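-- pv_equiv track=rewrite | github.com/carlosardura/minkowski-1plus1d | minkowski/irs.py | generate_event_name
-- ===== SOURCE A (Python) =====
-- import string
--
-- def generate_event_name(existing_names: list) -> str:
--         """
--         Generate an event not present in the existing names list.
--         """
--         letters = string.ascii_uppercase
--         n = 1
--
--         while True:
--                 for i in range(26**n):
--                         name = ""
--                         num = i
--                         for _ in range(n):
--                                 name = letters[num % 26] + name
--                                 num //= 26
--                         if name not in existing_names:
--                                 return name
--                 n += 1
-- ===== SOURCE B (Python) =====
-- import string
--
-- def generate_event_name(existing_names: list) -> str:
--         """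
--         Generate an event not present in the existing names list.
--         """
--         letters = string.ascii_uppercase
--         taken = set(existing_names)
--         k = 1
--         while True:
--                 name = ""
--                 m = k
--                 while m > 0:
--                         m -= 1
--                         name = letters[m % 26] + name
--                         m //= 26
--                 if name not in taken:
--                         return name
--                 k += 1
-- ===== Notes on version B (the rewrite author's own statement) =====
-- stated objective: alternative
-- what changed: Replaces the nested per-length loops (outer n over name lengths, inner range(26**n) with an n-digit rebuild and a list membership scan) by a single counter loop that bijectively base-26-decodes each candidate and tests it against a set built once from existing_names.
import Mathlib
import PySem

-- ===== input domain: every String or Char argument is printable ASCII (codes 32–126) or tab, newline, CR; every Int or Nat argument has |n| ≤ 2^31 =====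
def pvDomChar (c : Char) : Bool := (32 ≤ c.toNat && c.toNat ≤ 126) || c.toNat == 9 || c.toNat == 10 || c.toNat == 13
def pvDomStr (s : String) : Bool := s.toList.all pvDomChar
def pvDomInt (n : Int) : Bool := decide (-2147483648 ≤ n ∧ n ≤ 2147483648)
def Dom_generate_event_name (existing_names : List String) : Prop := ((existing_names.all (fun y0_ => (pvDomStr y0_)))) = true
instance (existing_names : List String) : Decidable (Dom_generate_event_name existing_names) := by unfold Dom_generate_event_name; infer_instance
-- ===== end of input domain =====

-- B replaces A's nested per-length loops and list scans by one counter loop with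
-- bijective base-26 decoding and a set built once (objective: alternative).
-- Both ports use fuel (existing_names.length + 1 rounds); the proofs show the fuel
-- is never exhausted, so the "" fallback only makes the same computation total.

-- ===== PORT A =====
def pvLetters : List Char := "ABCDEFGHIJKLMNOPQRSTUVWXYZ".toList

/-- A's inner digit loop: `for _ in range(n): name = letters[num % 26] + name; num //= 26`. -/
def pvEncLoop : Nat → Nat → List Char → List Char
  | 0, _, name => name
  | Nat.succ m, num, name => pvEncLoop m (num / 26) (pvLetters.getD (num % 26) 'A' :: name)

/-- A's `for i in range(26**n)` loop: first generated name not in the list. -/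
def pvInnerA (existing : List String) (n : Nat) : List Nat → Option String
  | [] => none
  | i :: rest =>
    let name := String.ofList (pvEncLoop n i [])
    if name ∈ existing then pvInnerA existing n rest else some name

/-- A's `while True` loop over the length `n`, with fuel. -/
def pvOuterA (existing : List String) : Nat → Nat → String
  | 0, _ => ""
  | Nat.succ fuel, n =>
    match pvInnerA existing n (List.range (26 ^ n)) with
    | some name => name
    | none => pvOuterA existing fuel (n + 1)

def generate_event_name (existing_names : List String) : String :=
  pvOuterA existing_names (existing_names.length + 1) 1

-- ===== PORT B =====
/-- B's inner `while m > 0` loop: bijective base-26 decoding of the counter. -/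
def pvDecLoop : Nat → List Char → List Char
  | 0, name => name
  | Nat.succ m, name => pvDecLoop (m / 26) (pvLetters.getD (m % 26) 'A' :: name)
  decreasing_by exact Nat.lt_succ_of_le (Nat.div_le_self m 26)

/-- B's `while True` loop over the counter `k`, with fuel. -/
def pvLoopB (taken : PySem.Set String) : Nat → Nat → String
  | 0, _ => ""
  | Nat.succ fuel, k =>
    let name := String.ofList (pvDecLoop k [])
    if name ∈ taken then pvLoopB taken fuel (k + 1) else name

def generate_event_name_alt (existing_names : List String) : String :=
  pvLoopB (PySem.Set.ofList existing_names) (existing_names.length + 1) 1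

-- ===== PRECONDITION & SPEC =====
def Spec_generate_event_name (existing_names : List String) (out : String) : Prop := out = generate_event_name_alt existing_names
instance (existing_names : List String) (out : String) : Decidable (Spec_generate_event_name existing_names out) := by unfold Spec_generate_event_name; infer_instance

-- ===== CLAIM (what is proved, stated in full; the proofs are below) =====
def Claim_equal_generate_event_name : Prop := ∀ (existing_names : List String), Dom_generate_event_name existing_names → Spec_generate_event_name existing_names (generate_event_name existing_names)

-- ===== LEMMAS AND PROOFS =====

/-- Offset: `pvT n` = number of names of length ≤ n = 26 + 26² + … + 26ⁿ. -/
def pvT : Nat → Nat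
  | 0 => 0
  | n + 1 => 26 * (pvT n + 1)

theorem pvT_closed (n : Nat) : 25 * pvT n + 26 = 26 ^ (n + 1) := by
  induction n with
  | zero => simp [pvT]
  | succ n ih =>
    have : pvT (n + 1) = 26 * (pvT n + 1) := rfl
    have hp : (26 : Nat) ^ (n + 2) = 26 * 26 ^ (n + 1) := by ring
    omega

theorem pvT_succ (n : Nat) : pvT (n + 1) = pvT n + 26 ^ (n + 1) := by
  have h1 := pvT_closed n
  have h2 : pvT (n + 1) = 26 * (pvT n + 1) := rfl
  omega

theorem pvT_mono {m n : Nat} (h : m ≤ n) : pvT m ≤ pvT n := by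
  induction n, h using Nat.le_induction with
  | base => exact Nat.le_refl _
  | succ n hmn ih =>
    have h1 := pvT_succ n
    have hp : 0 < 26 ^ n := Nat.pow_pos (by norm_num)
    omega

theorem pvT_ge (n : Nat) : n ≤ pvT n := by
  induction n with
  | zero => simp [pvT]
  | succ n ih => show n + 1 ≤ 26 * (pvT n + 1); omega

theorem pvRangeSplit (s a b : Nat) (h : a ≤ b) :
    List.range' s b = List.range' s a ++ List.range' (s + a) (b - a) := by
  conv_lhs => rw [show b = a + (b - a) from by omega]
  rw [← List.range'_append]
  simp

theorem pvDecLoop_acc (m : Nat) : ∀ acc, pvDecLoop m acc = pvDecLoop m [] ++ acc := by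
  induction m using Nat.strong_induction_on with
  | _ m ih =>
    intro acc
    match m with
    | 0 => simp [pvDecLoop]
    | Nat.succ m =>
      rw [pvDecLoop, pvDecLoop, ih (m / 26) (Nat.lt_succ_of_le (Nat.div_le_self m 26)),
        ih (m / 26) (Nat.lt_succ_of_le (Nat.div_le_self m 26))
          (pvLetters.getD (m % 26) 'A' :: ([] : List Char))]
      simp

theorem pvDecLoop_ne_nil (m : Nat) : pvDecLoop (m + 1) [] ≠ [] := by
  rw [pvDecLoop, pvDecLoop_acc]
  simp

/-- Correspondence: candidate `pvT n + i + 1` of B decodes to A's length-(n+1) name number i. -/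
theorem pvDec_eq_enc (n : Nat) : ∀ i, i < 26 ^ (n + 1) → ∀ acc,
    pvDecLoop (pvT n + i + 1) acc = pvEncLoop (n + 1) i acc := by
  induction n with
  | zero =>
    intro i hi acc
    have h0 : pvT 0 + i + 1 = i + 1 := by simp [pvT]
    rw [h0, pvDecLoop, pvEncLoop, pvEncLoop]
    rw [Nat.div_eq_of_lt (by simpa using hi), pvDecLoop]
  | succ n ih =>
    intro i hi acc
    rw [show pvT (n + 1) + i + 1 = (pvT (n + 1) + i) + 1 from rfl, pvDecLoop]
    have hT : pvT (n + 1) = 26 * (pvT n + 1) := rfl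
    have hmod : (pvT (n + 1) + i) % 26 = i % 26 := by
      rw [hT, Nat.mul_add_mod]
    have hdiv : (pvT (n + 1) + i) / 26 = pvT n + i / 26 + 1 := by
      rw [hT]
      omega
    have hlt : i / 26 < 26 ^ (n + 1) := by
      apply Nat.div_lt_of_lt_mul
      calc i < 26 ^ (n + 2) := hi
        _ = 26 * 26 ^ (n + 1) := by ring
    rw [hmod, hdiv, ih (i / 26) hlt]
    rfl

theorem pvLetters_getD_inj {i j : Nat} (hi : i < 26) (hj : j < 26)
    (h : pvLetters.getD i 'A' = pvLetters.getD j 'A') : i = j := by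
  revert h
  interval_cases i <;> interval_cases j <;> decide

theorem pvDecLoop_inj (a : Nat) : ∀ b, pvDecLoop (a + 1) [] = pvDecLoop (b + 1) [] → a = b := by
  induction a using Nat.strong_induction_on with
  | _ a ih =>
    intro b h
    rw [pvDecLoop, pvDecLoop, pvDecLoop_acc (a / 26), pvDecLoop_acc (b / 26)] at h
    have h' := congrArg List.reverse h
    simp only [List.reverse_append, List.reverse_cons, List.reverse_nil, List.nil_append,
      List.cons_append, List.cons.injEq] at h'
    obtain ⟨hc, hrest⟩ := h'
    have h1 : pvDecLoop (a / 26) [] = pvDecLoop (b / 26) [] :=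
      List.reverse_injective (by simpa using hrest)
    have hmod : a % 26 = b % 26 :=
      pvLetters_getD_inj (Nat.mod_lt _ (by norm_num)) (Nat.mod_lt _ (by norm_num)) hc
    have hdiv : a / 26 = b / 26 := by
      rcases Nat.eq_zero_or_pos (a / 26) with h0 | hpos
      · rcases Nat.eq_zero_or_pos (b / 26) with h0' | hpos'
        · omega
        · exfalso
          obtain ⟨m, hm⟩ := Nat.exists_eq_succ_of_ne_zero (Nat.pos_iff_ne_zero.mp hpos')
          rw [h0, hm] at h1
          exact pvDecLoop_ne_nil m (by simpa [pvDecLoop] using h1.symm)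
      · rcases Nat.eq_zero_or_pos (b / 26) with h0' | hpos'
        · exfalso
          obtain ⟨m, hm⟩ := Nat.exists_eq_succ_of_ne_zero (Nat.pos_iff_ne_zero.mp hpos)
          rw [h0', hm] at h1
          exact pvDecLoop_ne_nil m (by simpa [pvDecLoop] using h1)
        · obtain ⟨m, hm⟩ := Nat.exists_eq_succ_of_ne_zero (Nat.pos_iff_ne_zero.mp hpos)
          obtain ⟨m', hm'⟩ := Nat.exists_eq_succ_of_ne_zero (Nat.pos_iff_ne_zero.mp hpos')
          rw [hm, hm'] at h1 ⊢
          exact congrArg Nat.succ (ih m (by omega) m' h1)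
    omega

/-- B's candidate name for counter k. -/
def pvDecName (k : Nat) : String := String.ofList (pvDecLoop k [])

theorem pvDecName_inj {a b : Nat} (ha : 1 ≤ a) (hb : 1 ≤ b)
    (h : pvDecName a = pvDecName b) : a = b := by
  obtain ⟨a', rfl⟩ := Nat.exists_eq_add_of_le ha
  obtain ⟨b', rfl⟩ := Nat.exists_eq_add_of_le hb
  have hl : pvDecLoop (1 + a') [] = pvDecLoop (1 + b') [] := by
    have := congrArg String.toList h
    simpa [pvDecName, String.toList_ofList] using this
  have := pvDecLoop_inj a' b' (by rwa [Nat.add_comm 1 a', Nat.add_comm 1 b'] at hl)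
  omega

/-- B's loop computes `find?` of the free predicate over the decoded candidate window. -/
theorem pvLoopB_eq_find (existing : List String) :
    ∀ (f k : Nat), pvLoopB (PySem.Set.ofList existing) f k =
      (((List.range' k f).map pvDecName).find?
        (fun s => !decide (s ∈ existing))).getD "" := by
  intro f
  induction f with
  | zero => intro k; simp [pvLoopB]
  | succ f ih =>
    intro k
    rw [pvLoopB, List.range'_succ]
    simp only [List.map_cons, List.find?_cons, pvDecName]
    by_cases h : String.ofList (pvDecLoop k []) ∈ existing
    · rw [if_pos ((PySem.Set.mem_ofList _ _).mpr h)]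
      rw [ih]
      simp [h]
    · rw [if_neg (fun hc => h ((PySem.Set.mem_ofList _ _).mp hc))]
      simp [h]

/-- A's inner loop is `find?` over the generated names. -/
theorem pvInnerA_eq_find (existing : List String) (n : Nat) :
    ∀ is, pvInnerA existing n is =
      ((is.map (fun i => String.ofList (pvEncLoop n i []))).find?
        (fun s => !decide (s ∈ existing))) := by
  intro is
  induction is with
  | nil => simp [pvInnerA]
  | cons i rest ih =>
    rw [pvInnerA]
    simp only [List.map_cons, List.find?_cons]
    by_cases h : String.ofList (pvEncLoop n i []) ∈ existing
    · simp [h, ih]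
    · simp [h]

/-- A's block of length-(n+1) names equals B's candidate window for that block. -/
theorem pvBlock_eq (n : Nat) :
    (List.range (26 ^ (n + 1))).map (fun i => String.ofList (pvEncLoop (n + 1) i []))
      = (List.range' (pvT n + 1) (26 ^ (n + 1))).map pvDecName := by
  rw [List.range'_eq_map_range, List.map_map]
  apply List.map_congr_left
  intro i hi
  simp only [List.mem_range] at hi
  simp only [Function.comp_apply, pvDecName]
  rw [show pvT n + 1 + i = pvT n + i + 1 by omega, pvDec_eq_enc n i hi]

/-- A's outer loop is `find?` over the concatenation of its blocks, one candidate window. -/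
theorem pvOuterA_eq_find (existing : List String) :
    ∀ (f n : Nat), pvOuterA existing f (n + 1) =
      (((List.range' (pvT n + 1) (pvT (n + f) - pvT n)).map pvDecName).find?
        (fun s => !decide (s ∈ existing))).getD "" := by
  intro f
  induction f with
  | zero => intro n; simp [pvOuterA]
  | succ f ih =>
    intro n
    rw [pvOuterA, pvInnerA_eq_find, pvBlock_eq]
    have hmono : pvT (n + 1) ≤ pvT (n + 1 + f) := pvT_mono (by omega)
    have hsplit : List.range' (pvT n + 1) (pvT (n + (f + 1)) - pvT n)
        = List.range' (pvT n + 1) (26 ^ (n + 1))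
          ++ List.range' (pvT (n + 1) + 1) (pvT (n + 1 + f) - pvT (n + 1)) := by
      have h1 := pvT_succ n
      have h3 : n + (f + 1) = n + 1 + f := by omega
      rw [h3, pvRangeSplit (pvT n + 1) (26 ^ (n + 1)) (pvT (n + 1 + f) - pvT n) (by omega)]
      congr 2 <;> omega
    rw [hsplit, List.map_append, List.find?_append]
    cases hfind : (((List.range' (pvT n + 1) (26 ^ (n + 1))).map pvDecName).find?
        (fun s => !decide (s ∈ existing))) with
    | some nm => simp
    | none => simp [ih (n + 1)]

/-- Pigeonhole: among the first `len+1` candidates one is free. -/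
theorem pv_exists_free (existing : List String) :
    ∃ s ∈ (List.range' 1 (existing.length + 1)).map pvDecName,
      (!decide (s ∈ existing)) = true := by
  by_contra hall
  simp only [not_exists, not_and] at hall
  have hsub : ((List.range' 1 (existing.length + 1)).map pvDecName) ⊆ existing := by
    intro s hs
    have := hall s hs
    simpa using this
  have hnd : ((List.range' 1 (existing.length + 1)).map pvDecName).Nodup := by
    apply List.Nodup.map_on
    · intro a ha b hb hab
      simp only [List.mem_range'_1] at ha hb
      exact pvDecName_inj ha.1 hb.1 hab
    · exact List.nodup_range'
  have h1 : ((List.range' 1 (existing.length + 1)).map pvDecName).toFinset.card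
      = ((List.range' 1 (existing.length + 1)).map pvDecName).length :=
    List.toFinset_card_of_nodup hnd
  have h2 : ((List.range' 1 (existing.length + 1)).map pvDecName).toFinset ⊆ existing.toFinset := by
    intro x hx
    rw [List.mem_toFinset] at hx ⊢
    exact hsub hx
  have h3 : existing.toFinset.card ≤ existing.length := List.toFinset_card_le existing
  have h4 := Finset.card_le_card h2
  simp only [List.length_map, List.length_range'] at h1
  omega

-- ===== VERDICT (by name: the statement is the Claim_ definition above) =====
theorem generate_event_name_spec : Claim_equal_generate_event_name := by
  intro existing _
  unfold Spec_generate_event_name generate_event_name generate_event_name_alt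
  rw [pvLoopB_eq_find, show (1 : Nat) = 0 + 1 from rfl, pvOuterA_eq_find]
  rw [show pvT 0 = 0 from rfl]
  simp only [Nat.zero_add, Nat.sub_zero]
  have hle : existing.length + 1 ≤ pvT (existing.length + 1) := pvT_ge _
  rw [pvRangeSplit 1 (existing.length + 1) (pvT (existing.length + 1)) hle, List.map_append, List.find?_append]
  obtain ⟨x, hx⟩ := Option.isSome_iff_exists.mp (List.find?_isSome.mpr (pv_exists_free existing))
  rw [hx]
  rfl
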